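-- pv_equiv track=rewrite | github.com/pcdd05/stanCode_python | SC101_2021.Mar-Apr/Assignment_5/boggle.py | check_input_format
-- ===== SOURCE A (Python) =====
-- def check_input_format(input_s):
-- 	"""
-- 	:param input_s: str, input string by user.
-- 	:return: bool, check if the input string is in legal format or not.
-- 	"""
-- 	if len(input_s) < 7 or len(input_s) > 8:
-- 		return False
-- 	for i in range(len(input_s)):
-- 		if i % 2 == 0:
-- 			if not input_s[i].isalpha():
-- 				return False
-- 		else:
-- 			if not input_s[i].isspace():
-- 				return False
-- 	return True
-- ===== SOURCE B (Python) =====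
-- def _ok(cs):
--     # consume alternating alphabetic/whitespace pairs two characters at a time
--     if not cs:
--         return True
--     if not cs[0].isalpha():
--         return False
--     rest = cs[1:]
--     if not rest:
--         return True
--     if not rest[0].isspace():
--         return False
--     return _ok(rest[1:])
--
-- def check_input_format(input_s):
--     if not (7 <= len(input_s) <= 8):
--         return False
--     return _ok(list(input_s))
-- ===== Notes on version B (the rewrite author's own statement) =====
-- stated objective: simpler
-- what changed: Replaced the single indexed loop with an i%2 parity branch by a pairwise recursion that consumes one alphabetic/whitespace pair of characters per step, with no index arithmetic.
import Mathlib
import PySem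

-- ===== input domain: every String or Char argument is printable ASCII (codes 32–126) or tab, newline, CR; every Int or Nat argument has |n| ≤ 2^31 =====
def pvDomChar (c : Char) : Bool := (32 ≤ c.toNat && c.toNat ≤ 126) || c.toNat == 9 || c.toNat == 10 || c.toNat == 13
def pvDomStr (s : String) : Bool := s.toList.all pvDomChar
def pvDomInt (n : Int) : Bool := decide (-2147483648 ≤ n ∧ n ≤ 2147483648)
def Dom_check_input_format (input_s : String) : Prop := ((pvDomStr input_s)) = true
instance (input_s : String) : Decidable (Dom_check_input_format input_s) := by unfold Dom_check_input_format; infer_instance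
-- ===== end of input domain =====

-- B replaces A's indexed loop with an i%2 parity branch by a recursion that consumes an
-- alphabetic/whitespace pair of characters per step (objective: simpler decomposition).

-- ===== PORT A =====
-- for i in range(len): parity branch with early returns, as a recursion over the index
def pvALoop (cs : List Char) (i : Nat) : Bool :=
  if h : i < cs.length then
    if i % 2 == 0 then
      if !(PySem.Chars.isalpha cs[i]) then false else pvALoop cs (i + 1)
    else
      if !(PySem.Chars.isspace cs[i]) then false else pvALoop cs (i + 1)
  else true
termination_by cs.length - i

def check_input_format (input_s : String) : Bool :=
  let cs := input_s.toList
  if cs.length < 7 || cs.length > 8 then false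
  else pvALoop cs 0

-- ===== PORT B =====
def pvBOk : List Char → Bool
  | [] => true
  | [c] => PySem.Chars.isalpha c
  | c :: d :: rest => if !(PySem.Chars.isalpha c) then false
      else if !(PySem.Chars.isspace d) then false
      else pvBOk rest

def check_input_format_alt (input_s : String) : Bool :=
  let cs := input_s.toList
  if 7 ≤ cs.length ∧ cs.length ≤ 8 then pvBOk cs else false

-- ===== PRECONDITION & SPEC =====
def Spec_check_input_format (input_s : String) (out : Bool) : Prop := out = check_input_format_alt input_s
instance (input_s : String) (out : Bool) : Decidable (Spec_check_input_format input_s out) := by unfold Spec_check_input_format; infer_instance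

-- ===== CLAIM (what is proved, stated in full; the proofs are below) =====
def Claim_equal_check_input_format : Prop := ∀ (input_s : String), Dom_check_input_format input_s → Spec_check_input_format input_s (check_input_format input_s)

-- ===== LEMMAS AND PROOFS =====
theorem pvALoop_eq_pvBOk (cs pre : List Char) (hpre : pre.length % 2 = 0) :
    pvALoop (pre ++ cs) pre.length = pvBOk cs := by
  match cs with
  | [] =>
      rw [pvALoop]
      simp [pvBOk]
  | [c] =>
      rw [pvALoop]
      have hlt : pre.length < (pre ++ [c]).length := by simp
      have hget : (pre ++ [c])[pre.length]'hlt = c := by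
        simp [List.getElem_append_right]
      have htail : pvALoop (pre ++ [c]) (pre.length + 1) = true := by
        rw [pvALoop]; simp
      simp [hget, hpre, htail, pvBOk]
  | c :: d :: rest =>
      rw [pvALoop]
      have hlt : pre.length < (pre ++ c :: d :: rest).length := by simp
      have hget : (pre ++ c :: d :: rest)[pre.length]'hlt = c := by
        simp [List.getElem_append_right]
      rw [pvALoop]
      have hlt2 : pre.length + 1 < (pre ++ c :: d :: rest).length := by simp
      have hget2 : (pre ++ c :: d :: rest)[pre.length + 1]'hlt2 = d := by
        rw [List.getElem_append_right (by omega)]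
        simp
      have hev : (pre.length % 2 == 0) = true := by simpa using hpre
      have hodd : ((pre.length + 1) % 2 == 0) = false := by
        rw [beq_eq_false_iff_ne]; omega
      have hrec : pvALoop (pre ++ c :: d :: rest) (pre.length + 2) = pvBOk rest := by
        have h := pvALoop_eq_pvBOk rest (pre ++ [c, d]) (by simp [hpre])
        simpa [List.append_assoc] using h
      simp only [hget, hget2, hev, hodd, hrec, pvBOk]
      by_cases h1 : PySem.Chars.isalpha c <;>
        by_cases h2 : PySem.Chars.isspace d <;> simp [h1, h2]
-- ===== VERDICT (by name: the statement is the Claim_ definition above) =====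
theorem check_input_format_spec : Claim_equal_check_input_format := by
  intro s _
  unfold Spec_check_input_format check_input_format check_input_format_alt
  have h := pvALoop_eq_pvBOk s.toList [] (by simp)
  simp only [List.nil_append, List.length_nil] at h
  by_cases h7 : s.length < 7
  · have hb : ¬(7 ≤ s.length ∧ s.length ≤ 8) := by omega
    simp [h7, hb]
  · by_cases h8 : 8 < s.length
    · have hb : ¬(7 ≤ s.length ∧ s.length ≤ 8) := by omega
      simp [h7, h8, hb]
    · have hb : 7 ≤ s.length ∧ s.length ≤ 8 := by omega
      simp [h7, h8, hb, h]
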